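-- pv_equiv track=rewrite | github.com/daniel-reich/ubiquitous-fiesta | Y5Ji2HDnQTX7MxeHt_14.py | snakefill
-- ===== SOURCE A (Python) =====
-- def snakefill(n):
--   snake = 1
--   ans = 0
--   while(True):
--     snake = snake*2
--     if snake <= n*n: ans+=1
--     else: break
--   return ans
-- ===== SOURCE B (Python) =====
-- def snakefill(n):
--   s = n*n
--   return max(0, s.bit_length() - 1)
-- ===== Notes on version B (the rewrite author's own statement) =====
-- stated objective: faster
-- what changed: Replaced the doubling while-loop with a closed form: the answer is floor(log2(n*n)) computed as max(0, (n*n).bit_length()-1), no loop at all.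
import Mathlib
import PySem

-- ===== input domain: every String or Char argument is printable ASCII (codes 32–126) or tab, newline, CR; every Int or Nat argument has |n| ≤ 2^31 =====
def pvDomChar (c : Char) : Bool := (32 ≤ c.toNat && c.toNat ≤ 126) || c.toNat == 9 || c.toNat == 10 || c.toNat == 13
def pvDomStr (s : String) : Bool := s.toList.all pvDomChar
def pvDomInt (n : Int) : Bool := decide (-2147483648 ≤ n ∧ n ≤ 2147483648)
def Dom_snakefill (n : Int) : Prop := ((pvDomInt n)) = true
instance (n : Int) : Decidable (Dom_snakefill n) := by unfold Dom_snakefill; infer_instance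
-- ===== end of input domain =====

-- B replaces A's doubling loop by the closed form max(0, (n*n).bit_length() - 1): faster (no loop).

-- ===== PORT A =====
-- A's while-loop: snake doubles each pass; ans counts the passes with snake ≤ n*n.
-- snake is always a positive power of two, carried as a Nat with its positivity proof for termination.
def snakefillLoop (nsq : Int) (snake : Nat) (ans : Int) (hs : 0 < snake) : Int :=
  if ((2 * snake : Nat) : Int) ≤ nsq then
    snakefillLoop nsq (2 * snake) (ans + 1) (by omega)
  else ans
termination_by (nsq + 1).toNat - snake
decreasing_by omega

def snakefill (n : Int) : Int := snakefillLoop (n * n) 1 0 (by omega)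

-- ===== PORT B =====
-- Python int.bit_length for a nonnegative int s
def pyBitLength (s : Nat) : Nat := if s = 0 then 0 else Nat.log2 s + 1

def snakefill_alt (n : Int) : Int := max 0 ((pyBitLength (n * n).toNat : Int) - 1)

-- ===== PRECONDITION & SPEC =====
def Spec_snakefill (n : Int) (out : Int) : Prop := out = snakefill_alt n
instance (n : Int) (out : Int) : Decidable (Spec_snakefill n out) := by unfold Spec_snakefill; infer_instance

-- ===== CLAIM (what is proved, stated in full; the proofs are below) =====
def Claim_equal_snakefill : Prop := ∀ (n : Int), Dom_snakefill n → Spec_snakefill n (snakefill n)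

-- ===== LEMMAS AND PROOFS =====

lemma log2_ge_two {t s : Nat} (hs : 0 < s) (h : 2 * s ≤ t) : 2 ≤ t / s :=
  (Nat.le_div_iff_mul_le hs).2 (by omega)

lemma snakefillLoop_eq (nsq : Int) (snake : Nat) (ans : Int) (hs : 0 < snake) :
    snakefillLoop nsq snake ans hs = ans + (Nat.log2 (nsq.toNat / snake) : Int) := by
  induction snake, ans, hs using snakefillLoop.induct nsq with
  | case1 snake ans hs hle ih =>
      rw [snakefillLoop, if_pos hle, ih]
      have h2 : 2 ≤ nsq.toNat / snake := log2_ge_two hs (by omega)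
      have hdd : nsq.toNat / (2 * snake) = nsq.toNat / snake / 2 := by
        rw [Nat.div_div_eq_div_mul, Nat.mul_comm]
      have hlog : Nat.log2 (nsq.toNat / snake) = Nat.log2 (nsq.toNat / snake / 2) + 1 := by
        rw [Nat.log2_eq_log_two, Nat.log2_eq_log_two, Nat.log_div_base]
        have := Nat.log_pos (by norm_num) h2
        omega
      rw [hdd, hlog]
      push_cast
      ring
  | case2 snake ans hs hgt =>
      rw [snakefillLoop, if_neg hgt]
      have : nsq.toNat / snake < 2 := by
        apply Nat.div_lt_of_lt_mul
        omega
      rw [show Nat.log2 (nsq.toNat / snake) = 0 from by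
        rw [Nat.log2_eq_log_two]; exact Nat.log_of_lt this]
      simp

lemma snakefill_eq_log2 (n : Int) : snakefill n = (Nat.log2 (n * n).toNat : Int) := by
  rw [snakefill, snakefillLoop_eq]
  simp

-- ===== VERDICT (by name: the statement is the Claim_ definition above) =====
theorem snakefill_spec : Claim_equal_snakefill := by
  intro n _
  unfold Spec_snakefill snakefill_alt pyBitLength
  rw [snakefill_eq_log2]
  by_cases h : (n * n).toNat = 0
  · rw [if_pos h, h]
    simp [Nat.log2]
  · rw [if_neg h]
    push_cast
    omega
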